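-- pv_equiv track=rewrite | github.com/kshitij200605/CybSec | app/game.py | calculate_progress_and_badges
-- ===== SOURCE A (Python) =====
-- def calculate_progress_and_badges(sess):
--     progress = sum(bool(sess.get(k)) for k in [
--         'scan_complete', 'crack_complete', 'isolated_complete', 'logs_complete'
--     ])
--     badges = []
--     if sess.get('scan_complete'):
--         badges.append("Port Scanner")
--     if sess.get('crack_complete'):
--         badges.append("Password Cracker")
--     if sess.get('isolated_complete'):
--         badges.append("Firewall Defender")
--     if sess.get('logs_complete'):
--         badges.append("Log Hunter")
--     return progress, badges
-- ===== SOURCE B (Python) =====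
-- _KEYS = ['scan_complete', 'crack_complete', 'isolated_complete', 'logs_complete']
-- _NAMES = ["Port Scanner", "Password Cracker", "Firewall Defender", "Log Hunter"]
-- # All 16 possible outcomes precomputed once from the bitmask of completed steps.
-- _TABLE = [
--     (sum((m >> i) & 1 for i in range(4)),
--      [_NAMES[i] for i in range(4) if (m >> i) & 1])
--     for m in range(16)
-- ]
--
-- def calculate_progress_and_badges(sess):
--     mask = 0
--     for i, k in enumerate(_KEYS):
--         if sess.get(k):
--             mask |= 1 << i
--     progress, badges = _TABLE[mask]
--     return progress, list(badges)
-- ===== Notes on version B (the rewrite author's own statement) =====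
-- stated objective: alternative
-- what changed: B encodes the four completion flags as a 4-bit mask in one pass over an ordered key list and returns the result by indexing a precomputed 16-entry table of every possible (progress, badges) outcome, instead of A's sum-comprehension pass plus four hard-coded if/append branches.
import Mathlib
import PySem

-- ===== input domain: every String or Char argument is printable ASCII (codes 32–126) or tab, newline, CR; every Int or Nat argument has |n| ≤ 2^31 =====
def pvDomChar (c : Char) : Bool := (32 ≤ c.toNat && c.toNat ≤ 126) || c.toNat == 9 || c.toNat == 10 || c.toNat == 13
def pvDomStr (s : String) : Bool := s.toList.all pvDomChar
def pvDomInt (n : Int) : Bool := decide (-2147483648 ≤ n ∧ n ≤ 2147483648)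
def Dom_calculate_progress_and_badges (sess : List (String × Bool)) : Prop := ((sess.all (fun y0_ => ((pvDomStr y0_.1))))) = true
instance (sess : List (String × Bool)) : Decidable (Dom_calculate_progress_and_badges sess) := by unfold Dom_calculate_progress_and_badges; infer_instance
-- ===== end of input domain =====

-- B encodes the four completion flags as a bitmask and returns the answer from a 16-entry
-- table of all possible (progress, badges) outcomes, precomputed once (objective: alternative).

-- ===== PORT A =====
-- progress = sum(bool(sess.get(k)) for k in [...]); then four if-branches appending badges
def calculate_progress_and_badges (sess : List (String × Bool)) : Int × List String :=
  let d := PySem.Dict.mk sess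
  let progress : Int :=
    (["scan_complete", "crack_complete", "isolated_complete", "logs_complete"].map
      (fun k => if d.getD k false then (1 : Int) else 0)).sum
  let badges : List String := []
  let badges := if d.getD "scan_complete" false then badges ++ ["Port Scanner"] else badges
  let badges := if d.getD "crack_complete" false then badges ++ ["Password Cracker"] else badges
  let badges := if d.getD "isolated_complete" false then badges ++ ["Firewall Defender"] else badges
  let badges := if d.getD "logs_complete" false then badges ++ ["Log Hunter"] else badges
  (progress, badges)

-- ===== PORT B =====
def pvKEYS : List String :=
  ["scan_complete", "crack_complete", "isolated_complete", "logs_complete"]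
def pvNAMES : List String :=
  ["Port Scanner", "Password Cracker", "Firewall Defender", "Log Hunter"]
-- _TABLE = [(sum((m>>i)&1 for i in range(4)), [_NAMES[i] for i in range(4) if (m>>i)&1]) for m in range(16)]
-- (m >> i) & 1 ported with Int.shiftRight/Int.land, exact for these nonnegative ints
def pvTABLE : List (Int × List String) :=
  (PySem.List.pyRange 0 16 1).map (fun m =>
    (((PySem.List.pyRange 0 4 1).map (fun i => Int.land (m >>> i) 1)).sum,
     ((PySem.List.pyRange 0 4 1).filterMap (fun i =>
        if Int.land (m >>> i) 1 = 0 then none else PySem.List.pyGet? pvNAMES i))))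

def calculate_progress_and_badges_alt (sess : List (String × Bool)) : Int × List String :=
  let d := PySem.Dict.mk sess
  let mask : Int :=
    (PySem.List.enumerate pvKEYS).foldl
      (fun mask ik => if d.getD ik.2 false then Int.lor mask ((1 : Int) <<< ik.1) else mask) 0
  -- progress, badges = _TABLE[mask]; mask is always in [0,16) so the none case is unreachable
  match PySem.List.pyGet? pvTABLE mask with
  | some r => (r.1, r.2)
  | none => (0, [])

-- ===== PRECONDITION & SPEC =====
def Spec_calculate_progress_and_badges (sess : List (String × Bool)) (out : Int × List String) : Prop := out = calculate_progress_and_badges_alt sess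
instance (sess : List (String × Bool)) (out : Int × List String) : Decidable (Spec_calculate_progress_and_badges sess out) := by unfold Spec_calculate_progress_and_badges; infer_instance

-- ===== CLAIM (what is proved, stated in full; the proofs are below) =====
def Claim_equal_calculate_progress_and_badges : Prop := ∀ (sess : List (String × Bool)), Dom_calculate_progress_and_badges sess → Spec_calculate_progress_and_badges sess (calculate_progress_and_badges sess)

-- ===== LEMMAS AND PROOFS =====
theorem cpb_eq (sess : List (String × Bool)) :
    calculate_progress_and_badges sess = calculate_progress_and_badges_alt sess := by
  unfold calculate_progress_and_badges calculate_progress_and_badges_alt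
  set d := PySem.Dict.mk sess
  by_cases h1 : d.getD "scan_complete" false <;>
  by_cases h2 : d.getD "crack_complete" false <;>
  by_cases h3 : d.getD "isolated_complete" false <;>
  by_cases h4 : d.getD "logs_complete" false <;>
    simp [pvKEYS, h1, h2, h3, h4, PySem.List.enumerate] <;> decide

-- ===== VERDICT (by name: the statement is the Claim_ definition above) =====
theorem calculate_progress_and_badges_spec : Claim_equal_calculate_progress_and_badges := by
  intro sess _
  unfold Spec_calculate_progress_and_badges
  exact cpb_eq sess
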